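-- pv_equiv track=rewrite | github.com/ThenTech/BDA-Assignments | Plagiarism/Resources/submissions/submissions/2196363.py | cleanup_spaces
-- ===== SOURCE A (Python) =====
-- def cleanup_spaces(s):
--     delspace = False
--     x = 0
--     end = False
--     while not end:
--         if s[x]==' ' and delspace:
--             s = s[:x] + s[x+1:]
--             x -= 1
--             delspace = True
--         elif s[x]==' ' and not delspace:
--             delspace = True
--         elif not s[x]==' ':
--             delspace = False
--
--         x += 1
--         if x >= len(s):
--             end = True
--     if s[0] == ' ':
--         s = s[1:]
--     if s[len(s)-1] == ' ':
--         s = s[:len(s)-1]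
--     return s
-- ===== SOURCE B (Python) =====
-- def cleanup_spaces(s):
--     return ' '.join([w for w in s.split(' ') if w])
-- ===== Notes on version B (the rewrite author's own statement) =====
-- stated objective: idiomatic
-- what changed: replaces the in-place character-deletion while-loop (quadratic string slicing) plus manual one-character edge trims with a single split(' ')/filter-empty/join pipeline
-- outside the precondition, e.g. on cleanup_spaces(' '): A raises IndexError, B returns ''
import Mathlib
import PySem

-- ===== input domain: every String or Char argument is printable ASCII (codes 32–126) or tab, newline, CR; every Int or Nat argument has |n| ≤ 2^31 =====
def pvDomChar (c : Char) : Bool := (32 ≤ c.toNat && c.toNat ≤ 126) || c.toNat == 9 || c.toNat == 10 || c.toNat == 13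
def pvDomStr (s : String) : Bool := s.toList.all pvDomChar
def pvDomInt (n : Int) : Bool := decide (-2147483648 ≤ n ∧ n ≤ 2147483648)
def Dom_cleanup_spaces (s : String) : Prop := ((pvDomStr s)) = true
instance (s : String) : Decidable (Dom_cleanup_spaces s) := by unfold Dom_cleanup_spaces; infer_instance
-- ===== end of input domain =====

-- B replaces A's in-place character-deletion while-loop and manual one-character edge trims with an
-- idiomatic split(' ') / drop-empty / join pipeline; equal wherever A returns (Pre_ excludes only the
-- empty/all-space inputs on which A raises IndexError).

-- ===== PORT A =====
-- The while-loop of A: state (s, x, delspace); each iteration inspects s[x], possibly deletes s[x]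
-- (s = s[:x] + s[x+1:]; then x -= 1), sets delspace, then x += 1 and stops when x >= len(s).
-- x stays ≥ 0 in every Python execution (x is only decremented right after a deletion, which requires
-- delspace, hence a previously seen character, hence x ≥ 1), so a Nat index is exact here.
def cleanupLoop (s : List Char) (x : Nat) (del : Bool) : List Char :=
  if hx : x < s.length then   -- the loop only (re-)enters with x < len(s); s[x] is Python's s[x]
    if s[x] = ' ' ∧ del = true then
      -- s = s[:x] + s[x+1:]; x -= 1; …; x += 1; end-of-loop test x >= len(s)
      if (s.take x ++ s.drop (x+1)).length ≤ (x - 1) + 1 then s.take x ++ s.drop (x+1)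
      else cleanupLoop (s.take x ++ s.drop (x+1)) ((x - 1) + 1) true
    else if s[x] = ' ' then
      (if s.length ≤ x + 1 then s else cleanupLoop s (x+1) true)
    else
      (if s.length ≤ x + 1 then s else cleanupLoop s (x+1) false)
  else s
termination_by s.length - x
decreasing_by
  · simp only [List.length_append, List.length_take, List.length_drop]; omega
  · omega
  · omega

def cleanup_spaces (s : String) : String :=
  let l1 := cleanupLoop s.toList 0 false
  -- if s[0] == ' ': s = s[1:]   (Python raises IndexError on empty s; unreachable under Pre_)
  let l2 := if l1[0]? = some ' ' then l1.drop 1 else l1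
  -- if s[len(s)-1] == ' ': s = s[:len(s)-1]   (raises on empty s; unreachable under Pre_)
  let l3 := if l2[l2.length - 1]? = some ' ' then l2.take (l2.length - 1) else l2
  String.ofList l3

-- ===== PORT B =====
-- ' '.join([w for w in s.split(' ') if w])   (split with a nonempty literal separator = Chars.splitOn)
def cleanup_spaces_alt (s : String) : String :=
  PySem.Str.join " " (((PySem.Chars.splitOn s.toList [' ']).map String.ofList).filter (fun w => w ≠ ""))

-- ===== PRECONDITION & SPEC =====
-- Pre_ excludes exactly the inputs on which A raises IndexError: the empty string and all-space
-- strings (after collapsing, the unconditional s[0]/s[len(s)-1] checks hit an empty string).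
def Pre_cleanup_spaces (s : String) : Prop := s.toList.any (fun c => c ≠ ' ') = true
instance (s : String) : Decidable (Pre_cleanup_spaces s) := by unfold Pre_cleanup_spaces; infer_instance
def pvWitness_cleanup_spaces : String := " a  b "


def Spec_cleanup_spaces (s : String) (out : String) : Prop := out = cleanup_spaces_alt s
instance (s : String) (out : String) : Decidable (Spec_cleanup_spaces s out) := by unfold Spec_cleanup_spaces; infer_instance

-- ===== CLAIM (what is proved, stated in full; the proofs are below) =====
def Claim_equal_cleanup_spaces : Prop := ∀ (s : String), Dom_cleanup_spaces s → Pre_cleanup_spaces s → Spec_cleanup_spaces s (cleanup_spaces s)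

-- ===== LEMMAS AND PROOFS =====

-- What the while-loop computes, as a structural recursion: collapse runs of spaces to one space.
def collapseSp : List Char → Bool → List Char
  | [], _ => []
  | c :: t, del =>
    if c = ' ' then (if del then collapseSp t true else ' ' :: collapseSp t true)
    else c :: collapseSp t false

-- The non-empty maximal space-free chunks of l, in order.
def words : List Char → List (List Char)
  | [] => []
  | c :: t =>
    if c = ' ' then words t
    else (c :: t.takeWhile (fun d => d ≠ ' ')) :: words (t.dropWhile (fun d => d ≠ ' '))
termination_by l => l.length
decreasing_by
  · simp
  · have := List.length_dropWhile_le (fun d => decide (d ≠ ' ')) t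
    simp only [List.length_cons]; omega

-- single-space split of l, every chunk kept (Python s.split(' ')), structurally
def chunks : List Char → List (List Char)
  | [] => [[]]
  | c :: t => if c = ' ' then [] :: chunks t else (c :: (chunks t).headD []) :: (chunks t).tail

theorem cleanupLoop_eq_collapseSp (s : List Char) (x : Nat) (del : Bool) :
    (del = true → 1 ≤ x) → cleanupLoop s x del = s.take x ++ collapseSp (s.drop x) del := by
  induction s, x, del using cleanupLoop.induct with
  | case1 s x del h hc hstop =>
    intro hdel
    obtain ⟨hsp, hd⟩ := hc
    subst hd
    have hx1 : 1 ≤ x := hdel rfl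
    have hlen : s.length = x + 1 := by
      simp only [List.length_append, List.length_take, List.length_drop] at hstop
      omega
    have hdrop : s.drop x = ' ' :: s.drop (x+1) := by
      rw [List.drop_eq_getElem_cons h, hsp]
    have hnil : s.drop (x+1) = [] := List.drop_eq_nil_of_le (by omega)
    rw [cleanupLoop, dif_pos h, if_pos ⟨hsp, rfl⟩, if_pos hstop, hdrop, hnil]
    simp [collapseSp]
  | case2 s x del h hc hstop ih =>
    intro hdel
    obtain ⟨hsp, hd⟩ := hc
    subst hd
    have hx1 : 1 ≤ x := hdel rfl
    have hdrop : s.drop x = ' ' :: s.drop (x+1) := by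
      rw [List.drop_eq_getElem_cons h, hsp]
    rw [cleanupLoop, dif_pos h, if_pos ⟨hsp, rfl⟩, if_neg hstop]
    rw [ih (fun _ => by omega)]
    have hxx : x - 1 + 1 = x := by omega
    rw [hxx]
    have htake : (s.take x ++ s.drop (x+1)).take x = s.take x := by
      rw [List.take_append_of_le_length (by simp; omega)]
      simp [List.take_take]
    have hdrop2 : (s.take x ++ s.drop (x+1)).drop x = s.drop (x+1) := by
      rw [List.drop_append_of_le_length (by simp; omega)]
      simp
    rw [htake, hdrop2, hdrop]
    simp [collapseSp]
  | case3 s x del h hc hsp hstop =>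
    intro hdel
    have hdel' : del = false := by
      cases del
      · rfl
      · exact absurd ⟨hsp, rfl⟩ hc
    subst hdel'
    have hdrop : s.drop x = ' ' :: s.drop (x+1) := by
      rw [List.drop_eq_getElem_cons h, hsp]
    have hnil : s.drop (x+1) = [] := List.drop_eq_nil_of_le (by omega)
    rw [cleanupLoop, dif_pos h, if_neg hc, if_pos hsp, if_pos hstop]
    conv_lhs => rw [← List.take_append_drop x s]
    rw [hdrop, hnil]
    simp [collapseSp]
  | case4 s x del h hc hsp hstop ih =>
    intro hdel
    have hdel' : del = false := by
      cases del
      · rfl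
      · exact absurd ⟨hsp, rfl⟩ hc
    subst hdel'
    have hdrop : s.drop x = ' ' :: s.drop (x+1) := by
      rw [List.drop_eq_getElem_cons h, hsp]
    rw [cleanupLoop, dif_pos h, if_neg hc, if_pos hsp, if_neg hstop]
    rw [ih (fun _ => by omega)]
    rw [List.take_add_one, hdrop]
    have : s[x]? = some ' ' := by
      rw [List.getElem?_eq_getElem h, hsp]
    rw [this]
    simp [collapseSp]
  | case5 s x del h hc hsp hstop =>
    intro hdel
    have hdrop : s.drop x = s[x] :: s.drop (x+1) := List.drop_eq_getElem_cons h
    have hnil : s.drop (x+1) = [] := List.drop_eq_nil_of_le (by omega)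
    rw [cleanupLoop, dif_pos h, if_neg hc, if_neg hsp, if_pos hstop]
    conv_lhs => rw [← List.take_append_drop x s]
    rw [hdrop, hnil]
    simp [collapseSp, hsp]
  | case6 s x del h hc hsp hstop ih =>
    intro hdel
    have hdrop : s.drop x = s[x] :: s.drop (x+1) := List.drop_eq_getElem_cons h
    rw [cleanupLoop, dif_pos h, if_neg hc, if_neg hsp, if_neg hstop]
    rw [ih (fun hf => absurd hf (by simp))]
    rw [hdrop]
    simp only [collapseSp, if_neg hsp]
    rw [List.take_add_one, List.getElem?_eq_getElem h, List.append_assoc]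
    rfl
  | case7 s x del h =>
    intro hdel
    rw [cleanupLoop, dif_neg h]
    have hx : s.length ≤ x := by omega
    rw [List.take_of_length_le hx, List.drop_eq_nil_of_le hx]
    simp [collapseSp]

theorem collapseSp_true_eq_dropWhile (t : List Char) :
    collapseSp t true = collapseSp (t.dropWhile (fun c => c = ' ')) false := by
  induction t with
  | nil => rfl
  | cons c u ih =>
    by_cases hc : c = ' '
    · subst hc; simpa [collapseSp] using ih
    · simp [collapseSp, hc]

theorem collapseSp_word (w r : List Char) (hw : ∀ c ∈ w, c ≠ ' ') :
    collapseSp (w ++ r) false = w ++ collapseSp r false := by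
  induction w with
  | nil => rfl
  | cons c u ih =>
    have hc : c ≠ ' ' := hw c (by simp)
    simp only [List.cons_append, collapseSp, if_neg hc]
    rw [ih (fun d hd => hw d (by simp [hd]))]

theorem words_cons_space (t : List Char) : words (' ' :: t) = words t := by
  simp [words]

theorem words_dropWhile_spaces (l : List Char) :
    words (l.dropWhile (fun c => c = ' ')) = words l := by
  induction l with
  | nil => rfl
  | cons c t ih =>
    by_cases hc : c = ' '
    · subst hc; simpa [words_cons_space] using ih
    · simp [hc]

theorem chunks_ne_nil (l : List Char) : chunks l ≠ [] := by
  cases l with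
  | nil => simp [chunks]
  | cons c t => by_cases hc : c = ' ' <;> simp [chunks, hc]

-- headD / filtered-tail of chunks, and filter chunks = words, jointly by structural induction
theorem chunks_spec (l : List Char) :
    (chunks l).filter (fun w => w ≠ []) = words l ∧
    (chunks l).headD [] = l.takeWhile (fun d => d ≠ ' ') ∧
    ((chunks l).tail.filter (fun w => w ≠ [])) = words (l.dropWhile (fun d => d ≠ ' ')) := by
  induction l with
  | nil => exact ⟨by simp [chunks, words], rfl, by simp [chunks, words]⟩
  | cons c t ih =>
    obtain ⟨ih1, ih2, ih3⟩ := ih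
    by_cases hc : c = ' '
    · subst hc
      refine ⟨?_, ?_, ?_⟩
      · simpa [chunks, words_cons_space] using ih1
      · simp [chunks]
      · simpa [chunks, List.dropWhile_cons, words_cons_space] using ih1
    · refine ⟨?_, ?_, ?_⟩
      · simp only [chunks, if_neg hc, List.filter_cons]
        simp only [words, if_neg hc]
        rw [ih2, ih3]
        simp
      · cases hch : chunks t with
        | nil => exact absurd hch (chunks_ne_nil t)
        | cons a as =>
          rw [hch] at ih2
          simp only [List.headD_cons] at ih2
          simp [chunks, hc, hch, ih2]
      · simpa [chunks, hc, List.dropWhile_cons] using ih3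

-- de-accumulated splitOn.go for a single-character separator
theorem splitOn_go_eq (fuel : Nat) :
    ∀ (l cur : List Char) (acc : List (List Char)), l.length < fuel →
      PySem.Chars.splitOn.go [' '] fuel l cur acc =
        acc.reverse ++ (chunks l).modifyHead (fun w => cur.reverse ++ w) := by
  induction fuel with
  | zero => intro l cur acc h; omega
  | succ fuel ih =>
    intro l cur acc h
    cases l with
    | nil => simp [PySem.Chars.splitOn.go, chunks]
    | cons c rest =>
      by_cases hc : c = ' '
      · subst hc
        rw [PySem.Chars.splitOn.go]
        rw [if_pos (by simp [List.isPrefixOf])]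
        simp only [List.length_cons] at h
        rw [ih _ _ _ (by simpa using Nat.lt_of_succ_lt_succ h)]
        simp [chunks]
        cases chunks rest <;> simp
      · rw [PySem.Chars.splitOn.go]
        rw [if_neg (by simp [List.isPrefixOf]; intro hh; exact hc hh.symm)]
        simp only [List.length_cons] at h
        rw [ih _ _ _ (by omega)]
        have hne := chunks_ne_nil rest
        cases hch : chunks rest with
        | nil => exact absurd hch hne
        | cons w ws => simp [chunks, hc, hch]

theorem splitOn_eq_chunks (l : List Char) :
    PySem.Chars.splitOn l [' '] = chunks l := by
  rw [PySem.Chars.splitOn, splitOn_go_eq (l.length + 1) l [] [] (by omega)]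
  have := chunks_ne_nil l
  cases h : chunks l with
  | nil => exact absurd h this
  | cons w ws => simp

-- the port's trailing strip, as getLast?/dropLast
def stripT (l : List Char) : List Char :=
  if l[l.length - 1]? = some ' ' then l.take (l.length - 1) else l

theorem stripT_eq (l : List Char) :
    stripT l = if l.getLast? = some ' ' then l.dropLast else l := by
  unfold stripT
  rw [List.getLast?_eq_getElem?, List.dropLast_eq_take]

theorem stripT_append (a b : List Char) (hb : b ≠ []) :
    stripT (a ++ b) = a ++ stripT b := by
  rw [stripT_eq, stripT_eq, List.getLast?_append_of_ne_nil _ hb]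
  by_cases h : b.getLast? = some ' '
  · rw [if_pos h, if_pos h, List.dropLast_append_of_ne_nil hb]
  · rw [if_neg h, if_neg h]

theorem stripT_space_cons (X : List Char) (hX : X ≠ []) :
    stripT (' ' :: X) = ' ' :: stripT X := by
  have h := stripT_append [' '] X hX
  simpa using h

theorem getLast?_ne_space (l : List Char) (hl : ∀ c ∈ l, c ≠ ' ') :
    l.getLast? ≠ some ' ' := by
  intro h
  exact hl ' ' (List.mem_of_getLast? h) rfl

theorem stripT_of_nonspace (l : List Char) (hl : ∀ c ∈ l, c ≠ ' ') :
    stripT l = l := by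
  rw [stripT_eq, if_neg (getLast?_ne_space l hl)]

theorem words_ne_nil (c : Char) (t : List Char) (hc : c ≠ ' ') :
    words (c :: t) ≠ [] := by
  simp [words, hc]

theorem collapseSp_ne_nil (c : Char) (t : List Char) (hc : c ≠ ' ') :
    collapseSp (c :: t) false ≠ [] := by
  simp [collapseSp, hc]

-- the core: for input starting with a non-space, trailing-strip of the collapsed string = join of words
theorem core (n : Nat) : ∀ l : List Char, l.length ≤ n → ∀ c t, l = c :: t → c ≠ ' ' →
    stripT (collapseSp l false) = PySem.Chars.join [' '] (words l) := by
  induction n with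
  | zero => intro l h c t hl _; subst hl; simp at h
  | succ n ih =>
    intro l hn c t hl hc
    subst hl
    have ht : t = t.takeWhile (fun d => d ≠ ' ') ++ t.dropWhile (fun d => d ≠ ' ') :=
      (List.takeWhile_append_dropWhile).symm
    have hwns : ∀ d ∈ t.takeWhile (fun d => d ≠ ' '), d ≠ ' ' := by
      intro d hd
      simpa using List.mem_takeWhile_imp hd
    have hcwns : ∀ d ∈ c :: t.takeWhile (fun d => d ≠ ' '), d ≠ ' ' := by
      intro d hd
      rcases List.mem_cons.mp hd with h1 | h1
      · subst h1; exact hc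
      · exact hwns d h1
    have hcol : collapseSp (c :: t) false =
        (c :: t.takeWhile (fun d => d ≠ ' ')) ++ collapseSp (t.dropWhile (fun d => d ≠ ' ')) false := by
      conv_lhs => rw [ht, ← List.cons_append]
      exact collapseSp_word _ _ hcwns
    have hwords : words (c :: t) =
        (c :: t.takeWhile (fun d => d ≠ ' ')) :: words (t.dropWhile (fun d => d ≠ ' ')) := by
      rw [words]
      simp [hc]
    rw [hcol, hwords]
    cases hrc : t.dropWhile (fun d => d ≠ ' ') with
    | nil =>
      simp only [collapseSp, List.append_nil]
      rw [stripT_of_nonspace _ hcwns]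
      simp [words, PySem.Chars.join, List.intercalate]
    | cons d r' =>
      have hd : d = ' ' := by
        have h1 := List.head?_dropWhile_not (fun d => decide (d ≠ ' ')) t
        rw [show List.dropWhile (fun d => decide (d ≠ ' ')) t
              = List.dropWhile (fun d => d ≠ ' ') t from rfl, hrc] at h1
        simpa using h1
      subst hd
      have hnr : collapseSp (' ' :: r') false =
          ' ' :: collapseSp (r'.dropWhile (fun c => c = ' ')) false := by
        rw [show collapseSp (' ' :: r') false = ' ' :: collapseSp r' true from by
          simp [collapseSp]]
        rw [collapseSp_true_eq_dropWhile]
      have hwr : words (' ' :: r') = words (r'.dropWhile (fun c => c = ' ')) := by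
        rw [words_cons_space, ← words_dropWhile_spaces r']
      rw [hnr, hwr]
      cases huc : r'.dropWhile (fun c => c = ' ') with
      | nil =>
        simp only [collapseSp]
        rw [stripT_append _ _ (by simp)]
        have hT : stripT [' '] = [] := by decide
        rw [show (' ' :: ([] : List Char)) = [' '] from rfl, hT]
        simp [words, PySem.Chars.join, List.intercalate]
      | cons d' u' =>
        have hd' : d' ≠ ' ' := by
          have h1 := List.head?_dropWhile_not (fun c => decide (c = ' ')) r'
          rw [show List.dropWhile (fun c => decide (c = ' ')) r'
                = List.dropWhile (fun c => c = ' ') r' from rfl, huc] at h1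
          simpa using h1
        have hlen : (d' :: u').length ≤ n := by
          have h1 := List.length_dropWhile_le (fun c => decide (c = ' ')) r'
          rw [show List.dropWhile (fun c => decide (c = ' ')) r'
                = List.dropWhile (fun c => c = ' ') r' from rfl, huc] at h1
          have h3 : (List.dropWhile (fun d => d ≠ ' ') t).length ≤ t.length :=
            List.length_dropWhile_le _ t
          rw [hrc] at h3
          simp only [List.length_cons] at h1 h3 hn ⊢
          omega
        have ihu := ih (d' :: u') hlen d' u' rfl hd'
        have hnu : collapseSp (d' :: u') false ≠ [] := collapseSp_ne_nil d' u' hd'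
        rw [stripT_append _ _ (by simp), stripT_space_cons _ hnu, ihu]
        cases hwuc : words (d' :: u') with
        | nil => exact absurd hwuc (words_ne_nil d' u' hd')
        | cons a as =>
          simp [PySem.Chars.join, List.intercalate, List.intersperse]

-- the port's leading strip turns collapseSp l false into collapseSp (dropWhile spaces l) false
theorem lead_strip (l : List Char) (hl : l ≠ []) :
    (if (collapseSp l false)[0]? = some ' ' then (collapseSp l false).drop 1 else collapseSp l false) =
      collapseSp (l.dropWhile (fun c => c = ' ')) false := by
  cases l with
  | nil => exact absurd rfl hl
  | cons c t =>
    by_cases hc : c = ' '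
    · subst hc
      simp only [collapseSp, if_neg Bool.false_ne_true]
      rw [collapseSp_true_eq_dropWhile]
      simp
    · simp only [collapseSp, if_neg hc]
      rw [if_neg (by simp [hc])]
      simp [hc, collapseSp]

theorem dropWhile_any_nonspace (l : List Char)
    (h : l.any (fun c => c ≠ ' ') = true) :
    ∃ c t, l.dropWhile (fun c => c = ' ') = c :: t ∧ c ≠ ' ' := by
  induction l with
  | nil => simp at h
  | cons c t ih =>
    by_cases hc : c = ' '
    · subst hc
      have ht : t.any (fun c => c ≠ ' ') = true := by simpa using h
      obtain ⟨d, u, hdu, hd⟩ := ih ht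
      exact ⟨d, u, by simp [hdu], hd⟩
    · exact ⟨c, t, by simp [hc], hc⟩

-- B's pipeline, reduced to words at the char level
theorem alt_eq_words (s : String) :
    cleanup_spaces_alt s = String.ofList (PySem.Chars.join [' '] (words s.toList)) := by
  unfold cleanup_spaces_alt
  have h1 : ((PySem.Chars.splitOn s.toList [' ']).map String.ofList).filter (fun w => w ≠ "") =
      ((PySem.Chars.splitOn s.toList [' ']).filter (fun w => w ≠ [])).map String.ofList := by
    rw [List.filter_map]
    congr 1
    apply List.filter_congr
    intro w _
    have hiff : (String.ofList w = "") ↔ (w = []) := by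
      constructor
      · intro he
        have h := congrArg String.toList he
        simpa using h
      · intro he; subst he; rfl
    simp [Function.comp, hiff]
  rw [h1, splitOn_eq_chunks, (chunks_spec s.toList).1]
  have h2 := PySem.Str.toList_join " " ((words s.toList).map String.ofList)
  have h3 : ((words s.toList).map String.ofList).map String.toList = words s.toList := by
    simp [Function.comp_def]
  rw [h3] at h2
  have : (" " : String).toList = [' '] := rfl
  rw [this] at h2
  rw [← h2]
  rw [String.ofList_toList]

-- ===== VERDICT (by name: the statement is the Claim_ definition above) =====
theorem cleanup_spaces_spec : Claim_equal_cleanup_spaces := by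
  intro s _ hpre
  unfold Spec_cleanup_spaces
  unfold Pre_cleanup_spaces at hpre
  have hany : s.toList.any (fun c => c ≠ ' ') = true := hpre
  have hne : s.toList ≠ [] := by
    intro h; rw [h] at hany; simp at hany
  obtain ⟨c, t, hct, hc⟩ := dropWhile_any_nonspace s.toList hany
  unfold cleanup_spaces
  rw [cleanupLoop_eq_collapseSp s.toList 0 false (by simp)]
  simp only [List.take_zero, List.drop_zero, List.nil_append]
  rw [lead_strip s.toList hne]
  have hcore := core (s.toList.dropWhile (fun c => c = ' ')).length
    (s.toList.dropWhile (fun c => c = ' ')) le_rfl c t hct hc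
  show String.ofList (stripT (collapseSp (s.toList.dropWhile (fun c => c = ' ')) false)) = _
  rw [hcore, words_dropWhile_spaces, alt_eq_words]
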